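-- pv_equiv track=rewrite | github.com/AutoclickerI/Baekjoon | 백준/Diamond/31505. N진수 곱셈 （HUGE）/N진수 곱셈 （HUGE）.py | shift1
-- ===== SOURCE A (Python) =====
-- def shift1(r,n):
--     ret=[]
--     s=0
--     for i in range(r+n-1):
--         if i<r:
--             s+=1
--         if 0<=i-n:
--             s-=1
--         ret+=s,
--     return ret
-- ===== SOURCE B (Python) =====
-- def shift1(r, n):
--     # overlap count at offset i of two windows of lengths r and n, as a closed form
--     return [min(i + 1, r) - max(0, i - n + 1) for i in range(r + n - 1)]
-- ===== Notes on version B (the rewrite author's own statement) =====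
-- stated objective: simpler
-- what changed: The running counter carried across the loop is replaced by a stateless comprehension computing each element independently via the closed form min(i+1,r) - max(0,i-n+1); Pre_ excludes negative lengths r or n that still yield a nonempty output, which lie outside the function's purpose (overlap counts of two sequence lengths) and where A's values are accidents of its loop state.
-- outside the precondition, e.g. on shift1(-1, 4): A returns [0, 0], B returns [-1, -1]; on shift1(3, -1): A returns [0], B returns [-1]
import Mathlib
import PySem

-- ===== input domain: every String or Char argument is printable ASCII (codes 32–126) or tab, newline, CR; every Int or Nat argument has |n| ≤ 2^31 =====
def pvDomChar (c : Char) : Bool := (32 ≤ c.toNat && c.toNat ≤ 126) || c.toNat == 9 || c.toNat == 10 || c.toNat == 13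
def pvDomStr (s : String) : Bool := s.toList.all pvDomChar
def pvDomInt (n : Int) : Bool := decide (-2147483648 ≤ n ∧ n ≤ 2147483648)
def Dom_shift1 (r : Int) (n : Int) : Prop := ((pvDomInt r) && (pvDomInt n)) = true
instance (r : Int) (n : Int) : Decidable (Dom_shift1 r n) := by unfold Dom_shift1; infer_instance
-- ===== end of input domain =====

-- B replaces A's running accumulator with a stateless per-element closed form (objective: simpler).


-- ===== PORT A =====
def shift1 (r : Int) (n : Int) : List Int :=
  ((PySem.List.pyRange 0 (r + n - 1) 1).foldl
    (fun (st : List Int × Int) i =>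
      let s1 := if i < r then st.2 + 1 else st.2
      let s2 := if 0 ≤ i - n then s1 - 1 else s1
      (st.1 ++ [s2], s2))
    ([], 0)).1

-- ===== PORT B =====
def shift1_alt (r : Int) (n : Int) : List Int :=
  (PySem.List.pyRange 0 (r + n - 1) 1).map
    (fun i => min (i + 1) r - max 0 (i - n + 1))

-- ===== PRECONDITION & SPEC =====
-- Pre_ excludes inputs where r or n is negative yet the loop is nonempty: negative window
-- lengths are outside the function's purpose (overlap counts of two sequence lengths), and
-- A's values there are accidents of its loop state.
def Pre_shift1 (r : Int) (n : Int) : Prop := (0 ≤ r ∧ 0 ≤ n) ∨ r + n ≤ 1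
instance (r : Int) (n : Int) : Decidable (Pre_shift1 r n) := by unfold Pre_shift1; infer_instance
def pvWitness_shift1 : Int × Int := (3, 4)

def Spec_shift1 (r : Int) (n : Int) (out : List Int) : Prop := out = shift1_alt r n
instance (r : Int) (n : Int) (out : List Int) : Decidable (Spec_shift1 r n out) := by unfold Spec_shift1; infer_instance

-- ===== CLAIM (what is proved, stated in full; the proofs are below) =====
def Claim_equal_shift1 : Prop := ∀ (r : Int) (n : Int), Dom_shift1 r n → Pre_shift1 r n → Spec_shift1 r n (shift1 r n)

-- ===== LEMMAS AND PROOFS =====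

-- loop invariant (for 0 ≤ r, 0 ≤ n): after the first k iterations, ret is the closed-form
-- map and the counter s equals min k r - max 0 (k - n)
theorem shift1_loop (r n : Int) (hr : 0 ≤ r) (hn : 0 ≤ n) (k : Nat) :
    (PySem.List.pyRange 0 (k : Int) 1).foldl
      (fun (st : List Int × Int) i =>
        let s1 := if i < r then st.2 + 1 else st.2
        let s2 := if 0 ≤ i - n then s1 - 1 else s1
        (st.1 ++ [s2], s2))
      ([], 0)
    = ((PySem.List.pyRange 0 (k : Int) 1).map
        (fun i => min (i + 1) r - max 0 (i - n + 1)),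
       min (k : Int) r - max 0 ((k : Int) - n)) := by
  induction k with
  | zero =>
    simp only [Nat.cast_zero]
    rw [PySem.List.pyRange_one_eq_nil (by omega : (0:Int) ≤ 0)]
    simp
    omega
  | succ k ih =>
    have h : PySem.List.pyRange 0 ((k : Int) + 1) 1
        = PySem.List.pyRange 0 (k : Int) 1 ++ [(k : Int)] :=
      PySem.List.pyRange_one_succ_right (by omega)
    push_cast
    rw [h, List.foldl_append, List.map_append, ih]
    simp only [List.foldl_cons, List.foldl_nil, List.map_cons, List.map_nil]
    have step :
        (if 0 ≤ (k : Int) - n then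
            (if (k : Int) < r then min (k : Int) r - max 0 ((k : Int) - n) + 1
             else min (k : Int) r - max 0 ((k : Int) - n)) - 1
          else
            if (k : Int) < r then min (k : Int) r - max 0 ((k : Int) - n) + 1
            else min (k : Int) r - max 0 ((k : Int) - n))
        = min ((k : Int) + 1) r - max 0 ((k : Int) + 1 - n) := by
      have hk : (0 : Int) ≤ (k : Int) := by positivity
      split_ifs <;> omega
    rw [step]
    ring_nf

-- ===== VERDICT (by name: the statement is the Claim_ definition above) =====
theorem shift1_spec : Claim_equal_shift1 := by
  intro r n _ hpre
  unfold Spec_shift1 shift1 shift1_alt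
  rcases hpre with ⟨hr, hn⟩ | h
  · have hk : r + n - 1 = ((r + n - 1).toNat : Int) ∨ r + n - 1 ≤ 0 := by omega
    rcases hk with hk | hk
    · rw [hk, shift1_loop r n hr hn]
    · rw [PySem.List.pyRange_one_eq_nil (by omega)]; simp
  · rw [PySem.List.pyRange_one_eq_nil (by omega)]; simp
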